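-- pv_equiv track=rewrite | github.com/LucasGetsCode/guiaPython | Guia8Parte1.py | vocalesDistintas
-- ===== SOURCE A (Python) =====
-- def vocalesDistintas(palabra: str) -> bool:
--     vocales = ["a","e","i","o","u"]
--     cantidad = 0
--     for letra in palabra:
--         if letra.lower() in vocales:
--             vocales.remove(letra.lower())
--             cantidad += 1
--     return cantidad >= 3
-- ===== SOURCE B (Python) =====
-- def vocalesDistintas(palabra: str) -> bool:
--     bajo = palabra.lower()
--     return sum(1 for v in "aeiou" if v in bajo) >= 3
-- ===== Notes on version B (the rewrite author's own statement) =====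
-- stated objective: idiomatic
-- what changed: B inverts the traversal: instead of scanning the word while mutating a shrinking vowel list and a counter, it iterates over the fixed five vowels and counts which appear in the lowercased word.
import Mathlib
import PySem

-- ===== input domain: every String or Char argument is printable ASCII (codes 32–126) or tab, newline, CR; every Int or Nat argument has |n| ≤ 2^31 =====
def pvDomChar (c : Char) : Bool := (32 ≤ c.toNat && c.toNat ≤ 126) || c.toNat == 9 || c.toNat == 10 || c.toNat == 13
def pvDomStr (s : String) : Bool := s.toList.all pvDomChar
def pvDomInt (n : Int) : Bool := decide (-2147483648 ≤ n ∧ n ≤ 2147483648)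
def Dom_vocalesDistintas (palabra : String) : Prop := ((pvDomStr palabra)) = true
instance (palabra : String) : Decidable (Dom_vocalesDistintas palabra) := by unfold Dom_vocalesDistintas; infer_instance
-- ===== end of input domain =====

-- B iterates over the fixed five vowels and counts which appear in the lowercased word,
-- instead of A's scan of the word that mutates a shrinking vowel list and a counter (idiomatic).


-- ===== PORT A =====
-- one step of A's loop body: 'if letra.lower() in vocales: vocales.remove(...); cantidad += 1'
def vocalesDistintasStep (st : List Char × Int) (letra : Char) : List Char × Int :=
  let l := PySem.Chars.lowerChar letra
  if l ∈ st.1 then (st.1.erase l, st.2 + 1) else st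

def vocalesDistintas (palabra : String) : Bool :=
  decide (3 ≤ (palabra.toList.foldl vocalesDistintasStep (['a','e','i','o','u'], 0)).2)

-- ===== PORT B =====
def vocalesDistintas_alt (palabra : String) : Bool :=
  decide (3 ≤ (['a','e','i','o','u'].foldl
    (fun (acc : Int) v => if v ∈ (PySem.Str.lower palabra).toList then acc + 1 else acc) 0))

-- ===== PRECONDITION & SPEC =====
def Spec_vocalesDistintas (palabra : String) (out : Bool) : Prop := out = vocalesDistintas_alt palabra
instance (palabra : String) (out : Bool) : Decidable (Spec_vocalesDistintas palabra out) := by unfold Spec_vocalesDistintas; infer_instance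

-- ===== CLAIM (what is proved, stated in full; the proofs are below) =====
def Claim_equal_vocalesDistintas : Prop := ∀ (palabra : String), Dom_vocalesDistintas palabra → Spec_vocalesDistintas palabra (vocalesDistintas palabra)

-- ===== LEMMAS AND PROOFS =====

-- A's loop counts exactly the elements of its (duplicate-free) vowel list that occur lowered in the word.
theorem foldl_step_count (cs : List Char) : ∀ (vs : List Char) (n : Int), vs.Nodup →
    (cs.foldl vocalesDistintasStep (vs, n)).2
      = n + (vs.countP (fun v => v ∈ cs.map PySem.Chars.lowerChar) : Int) := by
  induction cs with
  | nil => intro vs n _; simp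
  | cons c cs ih =>
    intro vs n hnd
    simp only [List.foldl_cons, vocalesDistintasStep, List.map_cons]
    by_cases hm : PySem.Chars.lowerChar c ∈ vs
    · simp only [hm, if_pos]
      have hperm : List.Perm vs (PySem.Chars.lowerChar c :: vs.erase (PySem.Chars.lowerChar c)) :=
        List.perm_cons_erase hm
      have hcongr : (vs.erase (PySem.Chars.lowerChar c)).countP
            (fun v => v ∈ PySem.Chars.lowerChar c :: cs.map PySem.Chars.lowerChar)
          = (vs.erase (PySem.Chars.lowerChar c)).countP
            (fun v => v ∈ cs.map PySem.Chars.lowerChar) := by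
        apply List.countP_congr
        intro v hv
        have hne : v ≠ PySem.Chars.lowerChar c :=
          (List.Nodup.mem_erase_iff hnd).mp hv |>.1
        simp [hne]
      rw [ih _ _ (hnd.erase _), hperm.countP_eq, List.countP_cons]
      simp only [List.mem_cons] at hcongr ⊢
      simp only [true_or, decide_true, if_pos]
      omega
    · rw [if_neg hm, ih _ _ hnd]
      congr 2
      apply List.countP_congr
      intro v hv
      have hne : v ≠ PySem.Chars.lowerChar c := fun h => hm (h ▸ hv)
      simp [hne]

-- B's loop over the vowels is the same countP.
theorem foldl_b_count (bajo : List Char) (vs : List Char) :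
    (vs.foldl (fun (acc : Int) v => if v ∈ bajo then acc + 1 else acc) 0)
      = (vs.countP (fun v => v ∈ bajo) : Int) := by
  rw [PySem.List.foldl_ite_add_one]
  simp

-- lowering the string is mapping lowerChar over its characters
theorem lower_eq_map (s : String) :
    (PySem.Str.lower s).toList = s.toList.map PySem.Chars.lowerChar := by
  rw [PySem.Str.toList_lower]
  simp [PySem.Chars.lower]

-- ===== VERDICT (by name: the statement is the Claim_ definition above) =====
theorem vocalesDistintas_spec : Claim_equal_vocalesDistintas := by
  intro palabra _
  unfold Spec_vocalesDistintas vocalesDistintas vocalesDistintas_alt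
  rw [foldl_step_count _ _ _ (by decide), foldl_b_count, lower_eq_map, zero_add]
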